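-- pv_equiv track=rewrite | github.com/GilbertoQ/Bioinformatics | Pothole_test/image_processing.py | find_best_path
-- ===== SOURCE A (Python) =====
-- def find_best_path(pixel, pixel_vec, current_row, width, flag):
--     if current_row < len(pixel_vec):
--         best_pixel = None
--         if flag is True:
--             vec = [(x,abs(pixel-x)) for x, pix in enumerate(pixel_vec[current_row]) if pix != 0 and pixel <= x]
--         else:
--             vec = [(x,abs(pixel-x)) for x, pix in enumerate(pixel_vec[current_row]) if pix != 0 and pixel >= x]
--         """for x, pix in enumerate(pixel_vec[current_row]) if pix != 0:
--             # If pix is on the left of pixel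
--             if (pixel >= x or x < width/2) and flag is True:
--                 continue
--             elif (pixel <= x or x >= width/2) and flag is False:
--                 continue
--             elif best_pixel is None or abs(pixel - x) < abs(pixel - best_pixel):
--                 best_pixel = x"""
--         #if best_pixel is not None:
--         if len(vec) != 0:
--             best_pixel, _ = sorted(vec, key=lambda x: x[1])[0]
--             return [(best_pixel, current_row)] + find_best_path(best_pixel, pixel_vec, current_row+1, width, flag)
--         #else:
--         #    return find_best_path(pixel, pixel_vec, current_row+1, width, flag)
--     return []
-- ===== SOURCE B (Python) =====
-- def find_best_path(pixel, pixel_vec, current_row, width, flag):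
--     # Direction-aware scan: the nearest admissible pixel is simply the first
--     # candidate scanning right (flag True) or the first scanning left, so no
--     # candidate list or sort is built.  Iterative loop instead of recursion.
--     path = []
--     row = current_row
--     n = len(pixel_vec)
--     while row < n:
--         rowvec = pixel_vec[row]
--         best = None
--         if flag is True:
--             for x in range(len(rowvec)):
--                 if rowvec[x] != 0 and pixel <= x:
--                     best = x
--                     break
--         else:
--             for x in range(len(rowvec) - 1, -1, -1):
--                 if rowvec[x] != 0 and pixel >= x:
--                     best = x
--                     break
--         if best is None:
--             break
--         path.append((best, row))
--         pixel = best
--         row += 1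
--     return path
-- ===== Notes on version B (the rewrite author's own statement) =====
-- stated objective: alternative
-- what changed: Replaces the per-row build-candidate-list-then-stable-sort selection and the recursive row descent by an iterative accumulator loop that finds the nearest admissible pixel with a single directional scan (first hit rightwards when flag, first hit leftwards otherwise), so no candidate list is materialised and no sort happens.
import Mathlib
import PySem

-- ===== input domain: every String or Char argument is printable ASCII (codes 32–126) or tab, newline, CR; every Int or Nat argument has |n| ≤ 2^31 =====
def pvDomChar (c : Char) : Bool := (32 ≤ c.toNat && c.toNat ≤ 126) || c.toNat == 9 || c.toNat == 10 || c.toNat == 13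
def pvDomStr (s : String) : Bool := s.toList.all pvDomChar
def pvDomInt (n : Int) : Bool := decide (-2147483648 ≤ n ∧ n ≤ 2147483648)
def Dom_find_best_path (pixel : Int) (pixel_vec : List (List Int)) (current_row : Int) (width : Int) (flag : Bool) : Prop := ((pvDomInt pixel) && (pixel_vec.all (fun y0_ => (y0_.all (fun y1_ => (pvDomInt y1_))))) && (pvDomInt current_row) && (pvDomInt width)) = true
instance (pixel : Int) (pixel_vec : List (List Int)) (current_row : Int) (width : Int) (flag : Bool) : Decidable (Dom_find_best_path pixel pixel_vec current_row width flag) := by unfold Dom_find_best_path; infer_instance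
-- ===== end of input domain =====

-- B replaces A's build-list-then-sort per row (and recursive descent) by one directional
-- scan per row inside an iterative accumulator loop; same return value on all of Pre_.

-- ===== PORT A =====
-- the two list comprehensions of A (one per flag branch)
def pvVecA (flag : Bool) (pixel : Int) (r : List Int) : List (Int × Int) :=
  if flag then
    ((PySem.List.enumerate r 0).filter
        (fun p => decide (p.2 ≠ 0) && decide (pixel ≤ p.1))).map (fun p => (p.1, |pixel - p.1|))
  else
    ((PySem.List.enumerate r 0).filter
        (fun p => decide (p.2 ≠ 0) && decide (p.1 ≤ pixel))).map (fun p => (p.1, |pixel - p.1|))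

def find_best_path (pixel : Int) (pixel_vec : List (List Int)) (current_row : Int) (width : Int) (flag : Bool) : List (Int × Int) :=
  if h : current_row < (pixel_vec.length : Int) then
    let vec := pvVecA flag pixel ((PySem.List.pyGet? pixel_vec current_row).getD [])
    if vec ≠ [] then
      -- sorted(vec, key=lambda x: x[1])[0] : head of the stable sort (vec ≠ [] here)
      match (PySem.List.sorted vec (fun p => p.2) false).head? with
      | some (b, _) => (b, current_row) :: find_best_path b pixel_vec (current_row + 1) width flag
      | none => []
    else []
  else []
termination_by ((pixel_vec.length : Int) - current_row).toNat
decreasing_by omega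

-- ===== PORT B =====
-- forward scan: first index x ≥ start with nonzero value and pixel ≤ x
def pvScanFwd (pixel : Int) (r : List Int) (x : Int) : Option Int :=
  match r with
  | [] => none
  | p :: rest => if p ≠ 0 ∧ pixel ≤ x then some x else pvScanFwd pixel rest (x + 1)

-- backward scan (r given reversed, x counts down): first index x ≤ pixel with nonzero value
def pvScanBwd (pixel : Int) (rev : List Int) (x : Int) : Option Int :=
  match rev with
  | [] => none
  | p :: rest => if p ≠ 0 ∧ x ≤ pixel then some x else pvScanBwd pixel rest (x - 1)

-- the while loop of B, with its accumulator `path`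
def pvAltLoop (pixel_vec : List (List Int)) (flag : Bool) (pixel row : Int) (path : List (Int × Int)) : List (Int × Int) :=
  if h : row < (pixel_vec.length : Int) then
    let rowvec := (PySem.List.pyGet? pixel_vec row).getD []
    let best := if flag then pvScanFwd pixel rowvec 0
                else pvScanBwd pixel rowvec.reverse ((rowvec.length : Int) - 1)
    match best with
    | none => path
    | some b => pvAltLoop pixel_vec flag b (row + 1) (path ++ [(b, row)])
  else path
termination_by ((pixel_vec.length : Int) - row).toNat
decreasing_by omega

def find_best_path_alt (pixel : Int) (pixel_vec : List (List Int)) (current_row : Int) (width : Int) (flag : Bool) : List (Int × Int) :=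
  pvAltLoop pixel_vec flag pixel current_row []

-- ===== PRECONDITION & SPEC =====
-- Pre_ excludes exactly the inputs where A raises IndexError: current_row < len(pixel_vec)
-- (so the branch is entered) but current_row < -len(pixel_vec), where pixel_vec[current_row]
-- is out of range; B raises there too.
def Pre_find_best_path (pixel : Int) (pixel_vec : List (List Int)) (current_row : Int) (width : Int) (flag : Bool) : Prop :=
  -(pixel_vec.length : Int) ≤ current_row ∨ (pixel_vec.length : Int) ≤ current_row
instance (pixel : Int) (pixel_vec : List (List Int)) (current_row : Int) (width : Int) (flag : Bool) : Decidable (Pre_find_best_path pixel pixel_vec current_row width flag) := by unfold Pre_find_best_path; infer_instance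

def pvWitness_find_best_path : Int × List (List Int) × Int × Int × Bool := (0, [[0, 1], [2, 0]], 0, 2, true)

def Spec_find_best_path (pixel : Int) (pixel_vec : List (List Int)) (current_row : Int) (width : Int) (flag : Bool) (out : List (Int × Int)) : Prop := out = find_best_path_alt pixel pixel_vec current_row width flag
instance (pixel : Int) (pixel_vec : List (List Int)) (current_row : Int) (width : Int) (flag : Bool) (out : List (Int × Int)) : Decidable (Spec_find_best_path pixel pixel_vec current_row width flag out) := by unfold Spec_find_best_path; infer_instance

-- ===== CLAIM (what is proved, stated in full; the proofs are below) =====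
def Claim_equal_find_best_path : Prop := ∀ (pixel : Int) (pixel_vec : List (List Int)) (current_row : Int) (width : Int) (flag : Bool), Dom_find_best_path pixel pixel_vec current_row width flag → Pre_find_best_path pixel pixel_vec current_row width flag → Spec_find_best_path pixel pixel_vec current_row width flag (find_best_path pixel pixel_vec current_row width flag)

-- ===== LEMMAS AND PROOFS =====

lemma scanFwd_eq (pixel : Int) (r : List Int) (i : Int) :
    pvScanFwd pixel r i =
      (((PySem.List.enumerate r i).filter
          (fun p => decide (p.2 ≠ 0) && decide (pixel ≤ p.1))).head?).map (·.1) := by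
  induction r generalizing i with
  | nil => simp [pvScanFwd, PySem.List.enumerate_nil]
  | cons a rest ih =>
    rw [PySem.List.enumerate_cons]
    by_cases h : a ≠ 0 ∧ pixel ≤ i
    · rw [List.filter_cons_of_pos (by simp [h.1, h.2])]
      simp [pvScanFwd, h]
    · rw [List.filter_cons_of_neg (by by_cases h1 : a = 0 <;> by_cases h2 : pixel ≤ i <;> simp_all)]
      rw [pvScanFwd, if_neg h, ih]

lemma scanBwd_append (pixel : Int) (l1 l2 : List Int) (x : Int) :
    pvScanBwd pixel (l1 ++ l2) x =
      (pvScanBwd pixel l1 x).or (pvScanBwd pixel l2 (x - l1.length)) := by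
  induction l1 generalizing x with
  | nil => simp [pvScanBwd]
  | cons a rest ih =>
    by_cases h : a ≠ 0 ∧ x ≤ pixel
    · simp [pvScanBwd, h]
    · simp only [List.cons_append, pvScanBwd, if_neg h, ih]
      congr 2
      simp
      omega

lemma scanBwd_eq (pixel : Int) (r : List Int) (i : Int) :
    pvScanBwd pixel r.reverse (i + (r.length : Int) - 1) =
      (((PySem.List.enumerate r i).filter
          (fun p => decide (p.2 ≠ 0) && decide (p.1 ≤ pixel))).getLast?).map (·.1) := by
  induction r generalizing i with
  | nil => simp [pvScanBwd, PySem.List.enumerate_nil]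
  | cons a rest ih =>
    rw [PySem.List.enumerate_cons]
    have hrev : (a :: rest).reverse = rest.reverse ++ [a] := by simp
    rw [hrev, scanBwd_append]
    have hlen : (i + ((a :: rest).length : Int) - 1) = (i + 1) + (rest.length : Int) - 1 := by
      simp; omega
    have hx : (i + ((a :: rest).length : Int) - 1) - (rest.reverse.length : Int) = i := by
      simp; omega
    rw [hlen]
    rw [show ((i + 1) + (rest.length : Int) - 1) - (rest.reverse.length : Int) = i by simp; omega]
    rw [ih (i + 1)]
    by_cases h : a ≠ 0 ∧ i ≤ pixel
    · have hc : (fun p : Int × Int => decide (p.2 ≠ 0) && decide (p.1 ≤ pixel)) (i, a) = true := by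
        simp [h.1, h.2]
      rw [List.filter_cons, if_pos hc, List.getLast?_cons]
      cases hrest : ((PySem.List.enumerate rest (i + 1)).filter
          (fun p => decide (p.2 ≠ 0) && decide (p.1 ≤ pixel))) with
      | nil => simp [pvScanBwd, h]
      | cons q qs => simp [List.getLast?_cons, pvScanBwd, h]
    · rw [List.filter_cons, if_neg (by simpa using h)]
      simp [pvScanBwd, h]

-- pairwise-increasing indices survive the filter, and members satisfy the filter predicate
lemma best_eq (pixel : Int) (r : List Int) (flag : Bool) :
    (if flag then pvScanFwd pixel r 0
     else pvScanBwd pixel r.reverse ((r.length : Int) - 1)) =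
      ((PySem.List.sorted (pvVecA flag pixel r) (fun p => p.2) false).head?).map (·.1) := by
  cases flag with
  | true =>
    simp only [if_true, pvVecA]
    set raw := (PySem.List.enumerate r 0).filter
        (fun p => decide (p.2 ≠ 0) && decide (pixel ≤ p.1)) with hraw
    have hmem : ∀ p ∈ raw, pixel ≤ p.1 := by
      intro p hp
      have := List.of_mem_filter hp
      simp at this
      exact this.2
    have hpw : (raw.map (fun p => (p.1, |pixel - p.1|))).Pairwise (fun a b => a.2 < b.2) := by
      rw [List.pairwise_map]
      refine List.Pairwise.imp_of_mem ?_ ((PySem.List.pairwise_lt_enumerate (xs := r) (s := 0)).filter _)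
      intro a b ha hb hlt
      have h1 := hmem a ha
      have h2 := hmem b hb
      simp only
      rw [abs_of_nonpos (by omega), abs_of_nonpos (by omega)]
      omega
    rw [PySem.List.sorted_eq_of_perm_of_pairwise_lt _ _ _ (List.Perm.refl _) hpw]
    rw [scanFwd_eq]
    rw [List.head?_map, Option.map_map]
    rfl
  | false =>
    simp only [if_false, pvVecA, Bool.false_eq_true]
    set raw := (PySem.List.enumerate r 0).filter
        (fun p => decide (p.2 ≠ 0) && decide (p.1 ≤ pixel)) with hraw
    have hmem : ∀ p ∈ raw, p.1 ≤ pixel := by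
      intro p hp
      have := List.of_mem_filter hp
      simp at this
      exact this.2
    have hpw : ((raw.map (fun p => (p.1, |pixel - p.1|))).reverse).Pairwise (fun a b => a.2 < b.2) := by
      rw [List.pairwise_reverse, List.pairwise_map]
      refine List.Pairwise.imp_of_mem ?_ ((PySem.List.pairwise_lt_enumerate (xs := r) (s := 0)).filter _)
      intro a b ha hb hlt
      have h1 := hmem a ha
      have h2 := hmem b hb
      simp only
      rw [abs_of_nonneg (by omega), abs_of_nonneg (by omega)]
      omega
    rw [PySem.List.sorted_eq_of_perm_of_pairwise_lt _ _ _ (List.reverse_perm _) hpw]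
    have h0 : (0 : Int) + (r.length : Int) - 1 = (r.length : Int) - 1 := by ring
    rw [← h0, scanBwd_eq]
    rw [List.head?_reverse, List.getLast?_map, Option.map_map]
    rfl

lemma altLoop_eq (pixel_vec : List (List Int)) (width : Int) (flag : Bool) :
    ∀ (n : Nat) (pixel row : Int) (path : List (Int × Int)),
      ((pixel_vec.length : Int) - row).toNat ≤ n →
      pvAltLoop pixel_vec flag pixel row path =
        path ++ find_best_path pixel pixel_vec row width flag := by
  intro n
  induction n with
  | zero =>
    intro pixel row path hn
    have h : ¬ row < (pixel_vec.length : Int) := by omega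
    rw [pvAltLoop, find_best_path]
    simp [h]
  | succ n ih =>
    intro pixel row path hn
    by_cases h : row < (pixel_vec.length : Int)
    · rw [pvAltLoop, find_best_path]
      simp only [h, dite_true]
      set rowvec := (PySem.List.pyGet? pixel_vec row).getD [] with hrv
      rw [best_eq pixel rowvec flag]
      cases hh : ((PySem.List.sorted (pvVecA flag pixel rowvec) (fun p => p.2) false).head?) with
      | none =>
        have hnil : pvVecA flag pixel rowvec = [] := by
          have := (List.head?_eq_none_iff).mp hh
          rwa [PySem.List.sorted_eq_nil_iff] at this
        simp [hnil]
      | some q =>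
        have hne : pvVecA flag pixel rowvec ≠ [] := by
          intro hc
          rw [(PySem.List.sorted_eq_nil_iff _ _ _).mpr hc] at hh
          simp at hh
        obtain ⟨b, k⟩ := q
        simp only [Option.map_some, if_pos hne]
        rw [ih b (row + 1) (path ++ [(b, row)]) (by omega)]
        simp
    · rw [pvAltLoop, find_best_path]
      simp [h]

-- ===== VERDICT (by name: the statement is the Claim_ definition above) =====
theorem find_best_path_spec : Claim_equal_find_best_path := by
  intro pixel pixel_vec current_row width flag _ _
  unfold Spec_find_best_path find_best_path_alt
  rw [altLoop_eq pixel_vec width flag (((pixel_vec.length : Int) - current_row).toNat) pixel current_row [] (le_refl _)]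
  simp
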